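-- pv_equiv track=rewrite | github.com/ApartsinProjects/LLMBook | scripts/fix_math_quality.py | fix_text_operators
-- ===== SOURCE A (Python) =====
-- STANDARD_OPERATORS = {
--     "log": r"\log",
--     "exp": r"\exp",
--     "max": r"\max",
--     "min": r"\min",
--     "cos": r"\cos",
--     "sin": r"\sin",
--     "tan": r"\tan",
--     "det": r"\det",
--     "dim": r"\dim",
--     "sup": r"\sup",
--     "inf": r"\inf",
--     "lim": r"\lim",
--     "ln": r"\ln",
--     "lg": r"\lg",
--     "sec": r"\sec",
--     "csc": r"\csc",
--     "cot": r"\cot",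
--     "gcd": r"\gcd",
--     "deg": r"\deg",
--     "hom": r"\hom",
--     "ker": r"\ker",
--     "Pr": r"\Pr",
-- }
--
-- OPERATORNAME_WORDS = {
--     "softmax", "sigmoid", "tanh", "argmax", "argmin",
--     "ReLU", "relu", "GELU", "gelu", "swish",
--     "trace", "diag", "sign", "abs", "rank",
--     "Var", "Cov", "MSE", "CE", "KL",
--     "concat", "flatten", "pool", "conv",
--     "Attention", "FFN", "LayerNorm",
-- }
--
-- def fix_text_operators(latex):
--     """Replace \\text{op} with \\op or \\operatorname{op}."""
--     changed = False
--     for word, replacement in STANDARD_OPERATORS.items():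
--         old = f"\\text{{{word}}}"
--         if old in latex:
--             latex = latex.replace(old, replacement)
--             changed = True
--     for word in OPERATORNAME_WORDS:
--         old = f"\\text{{{word}}}"
--         if old in latex:
--             latex = latex.replace(old, f"\\operatorname{{{word}}}")
--             changed = True
--     return latex, changed
-- ===== SOURCE B (Python) =====
-- # Single left-to-right scan with one combined word->replacement table,
-- # instead of ~49 full-string replace passes.
--
-- _COMBINED = {
--     "log": "\\log", "exp": "\\exp", "max": "\\max", "min": "\\min",
--     "cos": "\\cos", "sin": "\\sin", "tan": "\\tan", "det": "\\det",
--     "dim": "\\dim", "sup": "\\sup", "inf": "\\inf", "lim": "\\lim",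
--     "ln": "\\ln", "lg": "\\lg", "sec": "\\sec", "csc": "\\csc",
--     "cot": "\\cot", "gcd": "\\gcd", "deg": "\\deg", "hom": "\\hom",
--     "ker": "\\ker", "Pr": "\\Pr",
--     "softmax": "\\operatorname{softmax}", "sigmoid": "\\operatorname{sigmoid}",
--     "tanh": "\\operatorname{tanh}", "argmax": "\\operatorname{argmax}",
--     "argmin": "\\operatorname{argmin}", "ReLU": "\\operatorname{ReLU}",
--     "relu": "\\operatorname{relu}", "GELU": "\\operatorname{GELU}",
--     "gelu": "\\operatorname{gelu}", "swish": "\\operatorname{swish}",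
--     "trace": "\\operatorname{trace}", "diag": "\\operatorname{diag}",
--     "sign": "\\operatorname{sign}", "abs": "\\operatorname{abs}",
--     "rank": "\\operatorname{rank}", "Var": "\\operatorname{Var}",
--     "Cov": "\\operatorname{Cov}", "MSE": "\\operatorname{MSE}",
--     "CE": "\\operatorname{CE}", "KL": "\\operatorname{KL}",
--     "concat": "\\operatorname{concat}", "flatten": "\\operatorname{flatten}",
--     "pool": "\\operatorname{pool}", "conv": "\\operatorname{conv}",
--     "Attention": "\\operatorname{Attention}", "FFN": "\\operatorname{FFN}",
--     "LayerNorm": "\\operatorname{LayerNorm}",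
-- }
--
--
-- def _is_word_char(c):
--     return c.isalpha() or c.isdigit() or c == "_"
--
--
-- def fix_text_operators(latex):
--     """Replace \\text{op} with \\op or \\operatorname{op} in one pass."""
--     out = []
--     changed = False
--     i = 0
--     n = len(latex)
--     while i < n:
--         if latex.startswith("\\text{", i):
--             j = i + 6
--             k = j
--             while k < n and _is_word_char(latex[k]):
--                 k += 1
--             if k < n and latex[k] == "}":
--                 r = _COMBINED.get(latex[j:k])
--                 if r is not None:
--                     out.append(r)
--                     changed = True
--                     i = k + 1
--                     continue
--         out.append(latex[i])
--         i += 1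
--     return "".join(out), changed
-- ===== Notes on version B (the rewrite author's own statement) =====
-- stated objective: alternative
-- what changed: Replaces ~49 sequential full-string str.replace passes (one per operator word) by a single left-to-right scan that, at each \text{word} occurrence, looks the captured word up in one combined word->replacement table.
import Mathlib
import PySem

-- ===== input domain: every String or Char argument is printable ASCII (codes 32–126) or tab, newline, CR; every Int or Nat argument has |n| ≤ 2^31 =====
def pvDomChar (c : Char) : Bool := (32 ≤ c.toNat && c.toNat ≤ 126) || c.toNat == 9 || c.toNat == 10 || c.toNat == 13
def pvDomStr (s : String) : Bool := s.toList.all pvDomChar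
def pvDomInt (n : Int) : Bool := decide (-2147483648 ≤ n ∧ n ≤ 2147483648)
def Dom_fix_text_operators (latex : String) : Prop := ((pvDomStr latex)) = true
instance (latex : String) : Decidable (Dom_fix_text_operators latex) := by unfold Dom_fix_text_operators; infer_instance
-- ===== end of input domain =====

-- B replaces A's ~49 sequential full-string replace passes by ONE left-to-right scan
-- with a single combined word→replacement table (objective: alternative algorithm).

-- ===== PORT A =====
def pvStdOps : List (String × String) :=
  [("log", "\\log"), ("exp", "\\exp"), ("max", "\\max"), ("min", "\\min"),
   ("cos", "\\cos"), ("sin", "\\sin"), ("tan", "\\tan"), ("det", "\\det"),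
   ("dim", "\\dim"), ("sup", "\\sup"), ("inf", "\\inf"), ("lim", "\\lim"),
   ("ln", "\\ln"), ("lg", "\\lg"), ("sec", "\\sec"), ("csc", "\\csc"),
   ("cot", "\\cot"), ("gcd", "\\gcd"), ("deg", "\\deg"), ("hom", "\\hom"),
   ("ker", "\\ker"), ("Pr", "\\Pr")]

-- OPERATORNAME_WORDS is a Python set; its iteration order is unspecified, and the
-- result does not depend on it (each pass touches only its own pattern) — ported in
-- source order.
def pvOpWords : List String :=
  ["softmax", "sigmoid", "tanh", "argmax", "argmin",
   "ReLU", "relu", "GELU", "gelu", "swish",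
   "trace", "diag", "sign", "abs", "rank",
   "Var", "Cov", "MSE", "CE", "KL",
   "concat", "flatten", "pool", "conv",
   "Attention", "FFN", "LayerNorm"]

def fix_text_operators (latex : String) : String × Bool :=
  let st1 := pvStdOps.foldl
    (fun (st : String × Bool) (p : String × String) =>
      let old := "\\text{" ++ p.1 ++ "}"
      if PySem.Str.isIn old st.1 then (PySem.Str.replace st.1 old p.2, true) else st)
    (latex, false)
  pvOpWords.foldl
    (fun (st : String × Bool) (w : String) =>
      let old := "\\text{" ++ w ++ "}"
      if PySem.Str.isIn old st.1 then
        (PySem.Str.replace st.1 old ("\\operatorname{" ++ w ++ "}"), true)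
      else st)
    st1

-- ===== PORT B =====
-- `c.isalpha() or c.isdigit() or c == "_"` (exact on the ASCII domain)
def pvW (c : Char) : Bool := c.isAlpha || c.isDigit || c == '_'

-- Source B's _COMBINED dict (insertion order; keys are distinct)
def pvCombined : List (String × String) :=
  [("log", "\\log"), ("exp", "\\exp"), ("max", "\\max"), ("min", "\\min"),
   ("cos", "\\cos"), ("sin", "\\sin"), ("tan", "\\tan"), ("det", "\\det"),
   ("dim", "\\dim"), ("sup", "\\sup"), ("inf", "\\inf"), ("lim", "\\lim"),
   ("ln", "\\ln"), ("lg", "\\lg"), ("sec", "\\sec"), ("csc", "\\csc"),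
   ("cot", "\\cot"), ("gcd", "\\gcd"), ("deg", "\\deg"), ("hom", "\\hom"),
   ("ker", "\\ker"), ("Pr", "\\Pr"),
   ("softmax", "\\operatorname{softmax}"), ("sigmoid", "\\operatorname{sigmoid}"),
   ("tanh", "\\operatorname{tanh}"), ("argmax", "\\operatorname{argmax}"),
   ("argmin", "\\operatorname{argmin}"), ("ReLU", "\\operatorname{ReLU}"),
   ("relu", "\\operatorname{relu}"), ("GELU", "\\operatorname{GELU}"),
   ("gelu", "\\operatorname{gelu}"), ("swish", "\\operatorname{swish}"),
   ("trace", "\\operatorname{trace}"), ("diag", "\\operatorname{diag}"),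
   ("sign", "\\operatorname{sign}"), ("abs", "\\operatorname{abs}"),
   ("rank", "\\operatorname{rank}"), ("Var", "\\operatorname{Var}"),
   ("Cov", "\\operatorname{Cov}"), ("MSE", "\\operatorname{MSE}"),
   ("CE", "\\operatorname{CE}"), ("KL", "\\operatorname{KL}"),
   ("concat", "\\operatorname{concat}"), ("flatten", "\\operatorname{flatten}"),
   ("pool", "\\operatorname{pool}"), ("conv", "\\operatorname{conv}"),
   ("Attention", "\\operatorname{Attention}"), ("FFN", "\\operatorname{FFN}"),
   ("LayerNorm", "\\operatorname{LayerNorm}")]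

def pvTable : List (List Char × List Char) :=
  pvCombined.map (fun p => (p.1.toList, p.2.toList))

-- Source B's per-position test: does `\text{<word>}` with <word> in the table start here?
-- (startswith "\\text{"; scan word chars — Source B's k-loop — i.e. takeWhile/dropWhile;
-- require the closing '}'; dict .get on the captured word)
def pvTryOp (T : List (List Char × List Char)) (s : List Char) :
    Option (List Char × List Char) :=
  if PySem.Chars.startswith s ['\\', 't', 'e', 'x', 't', '{'] then
    match (s.drop 6).dropWhile pvW, PySem.Dict.get? (PySem.Dict.mk T) ((s.drop 6).takeWhile pvW) with
    | '}' :: s', some r => some (r, s')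
    | _, _ => none
  else none

-- termination measure for the scan (cited by pvScanB's decreasing_by)
lemma pvTryOp_len {T : List (List Char × List Char)} {s r s' : List Char}
    (h : pvTryOp T s = some (r, s')) : s'.length < s.length := by
  unfold pvTryOp at h
  split at h
  · rename_i hsw
    have hpre : (['\\', 't', 'e', 'x', 't', '{'] : List Char) <+: s :=
      (PySem.Chars.startswith_iff _ _).1 hsw
    have h6 : 6 ≤ s.length := by obtain ⟨t, ht⟩ := hpre; subst ht; simp
    have htd := List.takeWhile_append_dropWhile (p := pvW) (l := s.drop 6)
    split at h
    · rename_i s2 r2 hd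
      cases h
      have hlen : (s.drop 6).length = ((s.drop 6).takeWhile pvW).length + ('}' :: s').length := by
        conv_lhs => rw [← htd]
        rw [r2]; simp
      simp at hlen; omega
    · exact absurd h (by simp)
  · exact absurd h (by simp)

-- Source B's single while-loop over the string, emitting either a replacement or one char
def pvScanB (T : List (List Char × List Char)) (s : List Char) : List Char × Bool :=
  match h : pvTryOp T s with
  | some (r, s') => let p := pvScanB T s'; (r ++ p.1, true)
  | none =>
    match s with
    | [] => ([], false)
    | c :: t => let p := pvScanB T t; (c :: p.1, p.2)
termination_by s.length
decreasing_by
  · exact pvTryOp_len h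
  · simp

def fix_text_operators_alt (latex : String) : String × Bool :=
  let p := pvScanB pvTable latex.toList
  (String.ofList p.1, p.2)

-- ===== PRECONDITION & SPEC =====
def Spec_fix_text_operators (latex : String) (out : String × Bool) : Prop := out = fix_text_operators_alt latex
instance (latex : String) (out : String × Bool) : Decidable (Spec_fix_text_operators latex out) := by unfold Spec_fix_text_operators; infer_instance

-- ===== CLAIM (what is proved, stated in full; the proofs are below) =====
def Claim_equal_fix_text_operators : Prop := ∀ (latex : String), Dom_fix_text_operators latex → Spec_fix_text_operators latex (fix_text_operators latex)

-- ===== LEMMAS AND PROOFS =====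

-- the pattern \text{w} as a char list
def pvPat (w : List Char) : List Char := '\\' :: 't' :: 'e' :: 'x' :: 't' :: '{' :: (w ++ ['}'])

-- A's per-word step on (string, changed), and the same step on char lists
def pvStepS (st : String × Bool) (p : String × String) : String × Bool :=
  let old := "\\text{" ++ p.1 ++ "}"
  if PySem.Str.isIn old st.1 then (PySem.Str.replace st.1 old p.2, true) else st

def pvStepC (st : List Char × Bool) (p : List Char × List Char) : List Char × Bool :=
  if PySem.Chars.isIn (pvPat p.1) st.1 then
    (PySem.Chars.replace st.1 (pvPat p.1) p.2, true)
  else st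

-- proof-side model of one full replace pass (leftmost, non-overlapping)
def pvScan1 (w rep : List Char) (s : List Char) : List Char :=
  match s with
  | [] => []
  | c :: t =>
    if (pvPat w).isPrefixOf (c :: t) then
      rep ++ pvScan1 w rep (List.drop (pvPat w).length (c :: t))
    else c :: pvScan1 w rep t
termination_by s.length
decreasing_by
  · simp [pvPat]
  · simp

-- replacements are "safe": they can never take part in a later \text{…} match
def pvSafeRepl (r : List Char) : Bool :=
  match r with
  | '\\' :: d1 :: d2 :: rest => (!(d1 == 't' && d2 == 'e')) && !((d1 :: d2 :: rest).contains '\\')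
  | _ => false

lemma pvW_ne_bs {c : Char} (h : pvW c = true) : c ≠ '\\' := by
  intro he; subst he; simp [pvW] at h

lemma pvSafeRepl_shape {r : List Char} (hr : pvSafeRepl r = true) :
    ∃ d1 d2 rest, r = '\\' :: d1 :: d2 :: rest ∧ ¬(d1 = 't' ∧ d2 = 'e') ∧
      '\\' ∉ (d1 :: d2 :: rest) := by
  unfold pvSafeRepl at hr
  split at hr
  · rename_i d1 d2 rest
    refine ⟨d1, d2, rest, rfl, ?_, ?_⟩
    · simp only [Bool.and_eq_true, Bool.not_eq_true'] at hr
      rintro ⟨rfl, rfl⟩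
      simp at hr
    · have := hr
      simp only [Bool.and_eq_true, Bool.not_eq_true'] at this
      simpa [List.contains_eq_mem] using this.2
  · exact absurd hr (by simp)

lemma pvPat_toList (x : String) : ("\\text{" ++ x ++ "}").toList = pvPat x.toList := by
  simp [pvPat]

lemma pvA_fold (latex : String) :
    fix_text_operators latex =
      (pvStdOps ++ pvOpWords.map (fun w => (w, "\\operatorname{" ++ w ++ "}"))).foldl
        pvStepS (latex, false) := by
  unfold fix_text_operators
  rw [List.foldl_append, List.foldl_map]
  rfl

lemma pvCombined_eq :
    pvCombined = pvStdOps ++ pvOpWords.map (fun w => (w, "\\operatorname{" ++ w ++ "}")) := by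
  decide

-- unfolding lemmas for pvScan1 / pvScanB
lemma pvScan1_nil (w rep : List Char) : pvScan1 w rep [] = [] := by
  rw [pvScan1]

lemma pvScan1_pos {w : List Char} (rep : List Char) {s : List Char}
    (h : (pvPat w).isPrefixOf s = true) :
    pvScan1 w rep s = rep ++ pvScan1 w rep (List.drop (pvPat w).length s) := by
  cases s with
  | nil => simp [pvPat, List.isPrefixOf] at h
  | cons c t => rw [pvScan1]; simp [h]

lemma pvScan1_cons_neg {w : List Char} (rep : List Char) {c : Char} {t : List Char}
    (h : (pvPat w).isPrefixOf (c :: t) = false) :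
    pvScan1 w rep (c :: t) = c :: pvScan1 w rep t := by
  rw [pvScan1]; simp [h]

lemma pvScan1_pat (w rep s' : List Char) :
    pvScan1 w rep (pvPat w ++ s') = rep ++ pvScan1 w rep s' := by
  rw [pvScan1_pos rep (by rw [List.isPrefixOf_iff_prefix]; exact List.prefix_append _ _)]
  rw [List.drop_left]

lemma pvScanB_some {T : List (List Char × List Char)} {s r s' : List Char}
    (h : pvTryOp T s = some (r, s')) :
    pvScanB T s = (r ++ (pvScanB T s').1, true) := by
  rw [pvScanB]; split <;> simp_all

lemma pvTryOp_nil (T : List (List Char × List Char)) : pvTryOp T [] = none := by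
  unfold pvTryOp; simp [PySem.Chars.startswith_iff]

lemma pvScanB_nil (T : List (List Char × List Char)) : pvScanB T [] = ([], false) := by
  rw [pvScanB]; split
  · simp_all [pvTryOp_nil]
  · rfl

lemma pvScanB_cons {T : List (List Char × List Char)} {c : Char} {t : List Char}
    (h : pvTryOp T (c :: t) = none) :
    pvScanB T (c :: t) = (c :: (pvScanB T t).1, (pvScanB T t).2) := by
  rw [pvScanB]; split <;> simp_all

-- Chars.replace (with a nonempty pattern) IS pvScan1
lemma pvReplaceGo (w rep : List Char) : ∀ (fuel : Nat) (l acc : List Char),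
    l.length ≤ fuel →
    PySem.Chars.replace.go (pvPat w) rep fuel l acc = acc.reverse ++ pvScan1 w rep l := by
  intro fuel
  induction fuel with
  | zero =>
    intro l acc hl
    have : l = [] := by cases l <;> simp_all
    subst this
    simp [PySem.Chars.replace.go, pvScan1_nil]
  | succ n ih =>
    intro l acc hl
    cases l with
    | nil => simp [PySem.Chars.replace.go, pvScan1_nil]
    | cons c t =>
      by_cases h : (pvPat w).isPrefixOf (c :: t) = true
      · have hlen : (pvPat w).length ≤ (c :: t).length :=
          (List.isPrefixOf_iff_prefix.1 h).length_le
        have hpatlen : 7 ≤ (pvPat w).length := by simp [pvPat]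
        simp only [PySem.Chars.replace.go, h, if_true]
        rw [ih (List.drop (pvPat w).length (c :: t)) (rep.reverse ++ acc)
          (by simp only [List.length_drop] at *; simp at hlen hl ⊢; omega)]
        rw [pvScan1_pos rep h]
        simp
      · have h' : (pvPat w).isPrefixOf (c :: t) = false := by
          revert h; cases (pvPat w).isPrefixOf (c :: t) <;> simp
        simp only [PySem.Chars.replace.go, h', if_false]
        rw [ih t (c :: acc) (by simp at hl; omega)]
        rw [pvScan1_cons_neg rep h']
        simp

lemma pvReplace_eq (w rep s : List Char) :
    PySem.Chars.replace s (pvPat w) rep = pvScan1 w rep s := by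
  rw [PySem.Chars.replace]
  have : (pvPat w).isEmpty = false := by simp [pvPat]
  rw [this]
  simpa using pvReplaceGo w rep s.length s [] le_rfl

-- isIn facts
lemma pvIsIn_cons (p : List Char) (c : Char) (t : List Char) :
    PySem.Chars.isIn p (c :: t) = (p.isPrefixOf (c :: t) || PySem.Chars.isIn p t) := by
  by_cases hp : p <+: (c :: t)
  · have h1 : PySem.Chars.isIn p (c :: t) = true := (PySem.Chars.isIn_iff_infix _ _).2 hp.isInfix
    have h2 : p.isPrefixOf (c :: t) = true := List.isPrefixOf_iff_prefix.2 hp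
    simp [h1, h2]
  · have h2 : p.isPrefixOf (c :: t) = false := by
      rw [← Bool.not_eq_true, List.isPrefixOf_iff_prefix]; exact hp
    by_cases hi : p <:+: t
    · have h1 : PySem.Chars.isIn p (c :: t) = true :=
        (PySem.Chars.isIn_iff_infix _ _).2 ((List.infix_cons_iff).2 (Or.inr hi))
      have h3 : PySem.Chars.isIn p t = true := (PySem.Chars.isIn_iff_infix _ _).2 hi
      simp [h1, h2, h3]
    · have h1 : PySem.Chars.isIn p (c :: t) = false :=
        (PySem.Chars.isIn_eq_false_iff _ _).2 (by rw [List.infix_cons_iff]; tauto)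
      have h3 : PySem.Chars.isIn p t = false := (PySem.Chars.isIn_eq_false_iff _ _).2 hi
      simp [h1, h2, h3]

lemma pvIsIn_pat_nil (w : List Char) : PySem.Chars.isIn (pvPat w) [] = false := by
  rw [PySem.Chars.isIn_eq_false_iff]
  intro h
  have := h.length_le
  simp [pvPat] at this

lemma pvScan1_id (w rep : List Char) : ∀ (n : Nat) (s : List Char), s.length ≤ n →
    PySem.Chars.isIn (pvPat w) s = false → pvScan1 w rep s = s := by
  intro n
  induction n with
  | zero =>
    intro s hs _
    have : s = [] := by cases s <;> simp_all
    subst this; exact pvScan1_nil w rep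
  | succ n ih =>
    intro s hs hin
    cases s with
    | nil => exact pvScan1_nil w rep
    | cons c t =>
      rw [pvIsIn_cons] at hin
      simp only [Bool.or_eq_false_iff] at hin
      rw [pvScan1_cons_neg rep hin.1]
      rw [ih t (by simp at hs; omega) hin.2]

lemma pvNotPrefix_of_ne_bs {w : List Char} {c : Char} (t : List Char) (h : c ≠ '\\') :
    (pvPat w).isPrefixOf (c :: t) = false := by
  rw [← Bool.not_eq_true, List.isPrefixOf_iff_prefix, pvPat]
  intro hp
  exact h ((List.cons_prefix_cons.1 hp).1.symm)

lemma pvScan1_pass {w rep : List Char} : ∀ (chunk X : List Char), '\\' ∉ chunk →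
    pvScan1 w rep (chunk ++ X) = chunk ++ pvScan1 w rep X := by
  intro chunk
  induction chunk with
  | nil => simp
  | cons c ck ih =>
    intro X hnb
    simp only [List.mem_cons, not_or] at hnb
    rw [List.cons_append, pvScan1_cons_neg rep (pvNotPrefix_of_ne_bs _ (fun h => hnb.1 h.symm))]
    simp [ih X hnb.2]

lemma pvScan1_prefix_reflect {w rep : List Char} (hr : pvSafeRepl rep = true) :
    ∀ (n : Nat) (t q : List Char), t.length ≤ n →
      q <+: pvScan1 w rep t → '\\' ∉ q → q <+: t := by
  intro n
  induction n with
  | zero =>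
    intro t q ht hq _
    have : t = [] := by cases t <;> simp_all
    subst this
    rw [pvScan1_nil] at hq
    simpa [List.prefix_nil.1 hq] using List.nil_prefix
  | succ n ih =>
    intro t q ht hq hnb
    cases t with
    | nil =>
      rw [pvScan1_nil] at hq
      simpa [List.prefix_nil.1 hq] using List.nil_prefix
    | cons c t' =>
      by_cases h : (pvPat w).isPrefixOf (c :: t') = true
      · rw [pvScan1_pos rep h] at hq
        obtain ⟨d1, d2, rest, hrep, -, -⟩ := pvSafeRepl_shape hr
        cases q with
        | nil => exact List.nil_prefix
        | cons qc q' =>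
          rw [hrep] at hq
          have := (List.cons_prefix_cons.1 hq).1
          subst this
          simp at hnb
      · rw [pvScan1_cons_neg rep (by revert h; cases (pvPat w).isPrefixOf (c :: t') <;> simp)] at hq
        cases q with
        | nil => exact List.nil_prefix
        | cons qc q' =>
          obtain ⟨hqc, hq'⟩ := List.cons_prefix_cons.1 hq
          subst hqc
          simp only [List.mem_cons, not_or] at hnb
          exact List.cons_prefix_cons.2 ⟨rfl, ih t' q' (by simp at ht; omega) hq' hnb.2⟩

-- pvTryOp characterizations
lemma pvTryOp_not_bs {T : List (List Char × List Char)} {c : Char} (t : List Char)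
    (h : c ≠ '\\') : pvTryOp T (c :: t) = none := by
  unfold pvTryOp
  have hsw : PySem.Chars.startswith (c :: t) ['\\', 't', 'e', 'x', 't', '{'] = false := by
    rw [← Bool.not_eq_true, PySem.Chars.startswith_iff]
    intro hp
    exact h ((List.cons_prefix_cons.1 hp).1.symm)
  rw [hsw]
  rfl

lemma pvSpan {w : List Char} (s' : List Char) (hw : ∀ c ∈ w, pvW c = true) :
    (w ++ '}' :: s').takeWhile pvW = w ∧ (w ++ '}' :: s').dropWhile pvW = '}' :: s' := by
  induction w with
  | nil => simp [List.takeWhile_cons, List.dropWhile_cons, pvW]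
  | cons c w' ih =>
    have hc : pvW c = true := hw c (by simp)
    have ih' := ih (fun d hd => hw d (by simp [hd]))
    simp [List.takeWhile_cons, List.dropWhile_cons, hc, ih'.1, ih'.2]

lemma pvTryOp_pat {T : List (List Char × List Char)} {w r : List Char} (s' : List Char)
    (hw : ∀ c ∈ w, pvW c = true) (hg : PySem.Dict.get? (PySem.Dict.mk T) w = some r) :
    pvTryOp T (pvPat w ++ s') = some (r, s') := by
  unfold pvTryOp
  have hsw : PySem.Chars.startswith (pvPat w ++ s') ['\\', 't', 'e', 'x', 't', '{'] = true := by
    rw [PySem.Chars.startswith_iff]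
    exact ⟨w ++ '}' :: s', by simp [pvPat]⟩
  rw [hsw]
  have hdrop : (pvPat w ++ s').drop 6 = w ++ '}' :: s' := by simp [pvPat]
  rw [if_pos rfl]
  rw [hdrop, (pvSpan s' hw).1, (pvSpan s' hw).2, hg]
  rfl

lemma pvTryOp_some_inv {T : List (List Char × List Char)} {s r s' : List Char}
    (h : pvTryOp T s = some (r, s')) :
    ∃ w, s = pvPat w ++ s' ∧ (∀ c ∈ w, pvW c = true) ∧
      PySem.Dict.get? (PySem.Dict.mk T) w = some r := by
  unfold pvTryOp at h
  split at h
  · rename_i hsw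
    obtain ⟨u, hu⟩ := (PySem.Chars.startswith_iff _ _).1 hsw
    split at h
    · rename_i s2 r2 hdw hgw
      cases h
      refine ⟨(s.drop 6).takeWhile pvW, ?_, ?_, hgw⟩
      · have hs6 : s.drop 6 = u := by rw [← hu]; simp
        have : s = ['\\', 't', 'e', 'x', 't', '{'] ++ s.drop 6 := by
          rw [hs6, ← hu]
        rw [this]
        conv_lhs => rw [← List.takeWhile_append_dropWhile (p := pvW) (l := s.drop 6)]
        rw [hdw]
        simp [pvPat]
      · intro c hc
        exact List.mem_takeWhile_imp hc
    · exact absurd h (by simp)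
  · exact absurd h (by simp)

-- scan pass-through
lemma pvScanB_chunk {T : List (List Char × List Char)} : ∀ (chunk X : List Char),
    '\\' ∉ chunk →
    pvScanB T (chunk ++ X) = (chunk ++ (pvScanB T X).1, (pvScanB T X).2) := by
  intro chunk
  induction chunk with
  | nil => simp
  | cons c ck ih =>
    intro X hnb
    simp only [List.mem_cons, not_or] at hnb
    rw [List.cons_append, pvScanB_cons (pvTryOp_not_bs _ (fun h => hnb.1 h.symm))]
    simp [ih X hnb.2]

lemma pvScanB_rep {T : List (List Char × List Char)} {r : List Char}
    (hr : pvSafeRepl r = true) (X : List Char) :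
    pvScanB T (r ++ X) = (r ++ (pvScanB T X).1, (pvScanB T X).2) := by
  obtain ⟨d1, d2, rest, hrep, hne, hnb⟩ := pvSafeRepl_shape hr
  subst hrep
  have htry : pvTryOp T (('\\' :: d1 :: d2 :: rest) ++ X) = none := by
    unfold pvTryOp
    have hsw : PySem.Chars.startswith (('\\' :: d1 :: d2 :: rest) ++ X)
        ['\\', 't', 'e', 'x', 't', '{'] = false := by
      rw [← Bool.not_eq_true, PySem.Chars.startswith_iff]
      intro hp
      simp only [List.cons_append] at hp
      obtain ⟨_, hp⟩ := List.cons_prefix_cons.1 hp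
      obtain ⟨h1, hp⟩ := List.cons_prefix_cons.1 hp
      obtain ⟨h2, _⟩ := List.cons_prefix_cons.1 hp
      exact hne ⟨h1.symm, h2.symm⟩
    rw [hsw]
    rfl
  rw [show ('\\' :: d1 :: d2 :: rest) ++ X = '\\' :: ((d1 :: d2 :: rest) ++ X) by simp]
  rw [pvScanB_cons (by simpa using htry)]
  simp only [List.cons_append]
  have hch := pvScanB_chunk (T := T) (d1 :: d2 :: rest) X hnb
  simp only [List.cons_append] at hch
  rw [hch]

lemma pvTryOp_empty_table (s : List Char) : pvTryOp [] s = none := by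
  unfold pvTryOp
  split
  · have hg : PySem.Dict.get? (PySem.Dict.mk ([] : List (List Char × List Char)))
        ((s.drop 6).takeWhile pvW) = none := by
      simp [PySem.Dict.get?]
    rw [hg]
    split <;> simp_all
  · rfl

lemma pvScanB_empty : ∀ (s : List Char), pvScanB [] s = (s, false) := by
  intro s
  induction s with
  | nil => exact pvScanB_nil []
  | cons c t ih => rw [pvScanB_cons (pvTryOp_empty_table _), ih]

-- THE KEY LEMMA: consing one word to the scan table = one full replace pass, then scan
lemma pvK (w r : List Char) (L' : List (List Char × List Char))
    (hw : ∀ c ∈ w, pvW c = true) (hr : pvSafeRepl r = true) :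
    ∀ (n : Nat) (s : List Char), s.length ≤ n →
      pvScanB ((w, r) :: L') s =
        ((pvScanB L' (pvScan1 w r s)).1,
          PySem.Chars.isIn (pvPat w) s || (pvScanB L' (pvScan1 w r s)).2) := by
  intro n
  induction n with
  | zero =>
    intro s hs
    have : s = [] := by cases s <;> simp_all
    subst this
    simp [pvScanB_nil, pvScan1_nil, pvIsIn_pat_nil]
  | succ n ih =>
    intro s hs
    cases s with
    | nil => simp [pvScanB_nil, pvScan1_nil, pvIsIn_pat_nil]
    | cons c t =>
      by_cases hp : (pvPat w).isPrefixOf (c :: t) = true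
      · -- the word w itself matches at the head
        obtain ⟨s', hs'⟩ : ∃ s', c :: t = pvPat w ++ s' :=
          (List.isPrefixOf_iff_prefix.1 hp).imp (fun _ h => h.symm)
        rw [hs']
        have hg : PySem.Dict.get? (PySem.Dict.mk ((w, r) :: L')) w = some r := by
          rw [PySem.Dict.get?_mk_cons]; simp
        have htry := pvTryOp_pat (T := (w, r) :: L') s' hw hg
        rw [pvScanB_some htry, pvScan1_pat, pvScanB_rep hr]
        have hlen : s'.length ≤ n := by
          have h2 := congrArg List.length hs'
          simp only [pvPat, List.length_cons, List.length_append, List.length_singleton] at h2 hs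
          omega
        rw [ih s' hlen]
        have hisin : PySem.Chars.isIn (pvPat w) (pvPat w ++ s') = true :=
          (PySem.Chars.isIn_iff_infix _ _).2 (List.prefix_append _ _).isInfix
        simp [hisin]
      · cases htry : pvTryOp ((w, r) :: L') (c :: t) with
        | some pr =>
          -- some other word W matches at the head
          obtain ⟨rW, s₂⟩ := pr
          obtain ⟨W, hdec, hWw, hgW⟩ := pvTryOp_some_inv htry
          have hWne : W ≠ w := by
            intro h
            subst h
            exact hp (List.isPrefixOf_iff_prefix.2 ⟨s₂, hdec.symm⟩)
          have hgW' : PySem.Dict.get? (PySem.Dict.mk L') W = some rW := by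
            rw [PySem.Dict.get?_mk_cons] at hgW
            simpa [show (w == W) = false by simpa using fun h => hWne h.symm] using hgW
          have hchunk : '\\' ∉ ('t' :: 'e' :: 'x' :: 't' :: '{' :: (W ++ ['}'])) := by
            simp only [List.mem_cons, List.mem_append, List.mem_singleton, not_or]
            refine ⟨by decide, by decide, by decide, by decide, by decide, ?_, by decide⟩
            intro hmem
            exact pvW_ne_bs (hWw _ hmem) rfl
          have hscan1 : pvScan1 w r (c :: t) = pvPat W ++ pvScan1 w r s₂ := by
            rw [hdec]
            rw [show pvPat W ++ s₂ = '\\' :: (('t' :: 'e' :: 'x' :: 't' :: '{' :: (W ++ ['}'])) ++ s₂) by simp [pvPat]]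
            rw [pvScan1_cons_neg r (by
              rw [← show pvPat W ++ s₂ = '\\' :: (('t' :: 'e' :: 'x' :: 't' :: '{' :: (W ++ ['}'])) ++ s₂) by simp [pvPat]]
              rw [← hdec]
              revert hp; cases (pvPat w).isPrefixOf (c :: t) <;> simp)]
            rw [pvScan1_pass _ _ hchunk]
            simp [pvPat]
          rw [pvScanB_some htry, hscan1]
          rw [pvScanB_some (pvTryOp_pat (T := L') _ hWw hgW')]
          have hlen : s₂.length ≤ n := by
            have h2 := congrArg List.length hdec
            simp only [pvPat, List.length_cons, List.length_append, List.length_singleton] at h2 hs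
            omega
          rw [ih s₂ hlen]
          simp
        | none =>
          have hp' : (pvPat w).isPrefixOf (c :: t) = false := by
            revert hp; cases (pvPat w).isPrefixOf (c :: t) <;> simp
          have h1 : pvScan1 w r (c :: t) = c :: pvScan1 w r t := pvScan1_cons_neg r hp'
          have htry2 : pvTryOp L' (c :: pvScan1 w r t) = none := by
            cases h2 : pvTryOp L' (c :: pvScan1 w r t) with
            | none => rfl
            | some pr2 =>
              exfalso
              obtain ⟨ρ, σ⟩ := pr2
              obtain ⟨V, hVdec, hVw, hVg⟩ := pvTryOp_some_inv h2
              have hc : c = '\\' := by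
                have := congrArg (fun l => l.head?) hVdec
                simpa [pvPat] using this
              subst hc
              have hVchunk : '\\' ∉ ('t' :: 'e' :: 'x' :: 't' :: '{' :: (V ++ ['}'])) := by
                simp only [List.mem_cons, List.mem_append, List.mem_singleton, not_or]
                refine ⟨by decide, by decide, by decide, by decide, by decide, ?_, by decide⟩
                intro hmem
                exact pvW_ne_bs (hVw _ hmem) rfl
              have hqpre : ('t' :: 'e' :: 'x' :: 't' :: '{' :: (V ++ ['}'])) <+: pvScan1 w r t := by
                have : pvScan1 w r t = ('t' :: 'e' :: 'x' :: 't' :: '{' :: (V ++ ['}'])) ++ σ := by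
                  have := hVdec
                  simp only [pvPat, List.cons_append] at this
                  exact (List.cons.injEq _ _ _ _ ▸ this :
                    ('\\' = '\\' ∧ pvScan1 w r t = _)).2
                exact ⟨σ, this.symm⟩
              have hqt : ('t' :: 'e' :: 'x' :: 't' :: '{' :: (V ++ ['}'])) <+: t :=
                pvScan1_prefix_reflect hr t.length t _ le_rfl hqpre hVchunk
              obtain ⟨t₂, ht₂⟩ := hqt
              have hsplit : ('\\' : Char) :: t = pvPat V ++ t₂ := by
                rw [← ht₂]; simp [pvPat]
              have hgVcomb : ∃ ρ', PySem.Dict.get? (PySem.Dict.mk ((w, r) :: L')) V = some ρ' := by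
                rw [PySem.Dict.get?_mk_cons]
                by_cases hwV : (w == V) = true
                · exact ⟨r, by simp [hwV]⟩
                · exact ⟨ρ, by simp [hwV, hVg]⟩
              obtain ⟨ρ', hρ'⟩ := hgVcomb
              have := pvTryOp_pat (T := (w, r) :: L') t₂ hVw hρ'
              rw [← hsplit] at this
              rw [htry] at this
              exact absurd this (by simp)
          rw [pvScanB_cons htry, h1, pvScanB_cons htry2]
          rw [ih t (by simp at hs; omega)]
          rw [pvIsIn_cons, hp']
          simp

-- fold of per-word replace passes = single combined scan
lemma pvM : ∀ (T : List (List Char × List Char)),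
    (∀ p ∈ T, (∀ c ∈ p.1, pvW c = true) ∧ pvSafeRepl p.2 = true) →
    ∀ (cs : List Char) (ch : Bool),
      T.foldl pvStepC (cs, ch) = ((pvScanB T cs).1, ch || (pvScanB T cs).2) := by
  intro T
  induction T with
  | nil => intro _ cs ch; simp [pvScanB_empty]
  | cons p T' ih =>
    intro hgood cs ch
    obtain ⟨w, r⟩ := p
    have hw := (hgood (w, r) (by simp)).1
    have hr := (hgood (w, r) (by simp)).2
    have hT' : ∀ p ∈ T', (∀ c ∈ p.1, pvW c = true) ∧ pvSafeRepl p.2 = true :=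
      fun p hp => hgood p (by simp [hp])
    have hK := pvK w r T' hw hr cs.length cs le_rfl
    simp only [List.foldl_cons]
    by_cases hin : PySem.Chars.isIn (pvPat w) cs = true
    · rw [show pvStepC (cs, ch) (w, r) =
          (PySem.Chars.replace cs (pvPat w) r, true) by simp [pvStepC, hin]]
      rw [pvReplace_eq, ih hT' (pvScan1 w r cs) true, hK]
      simp [hin]
    · have hin' : PySem.Chars.isIn (pvPat w) cs = false := by
        revert hin; cases PySem.Chars.isIn (pvPat w) cs <;> simp
      have hid : pvScan1 w r cs = cs := pvScan1_id w r cs.length cs le_rfl hin'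
      rw [show pvStepC (cs, ch) (w, r) = (cs, ch) by simp [pvStepC, hin']]
      rw [ih hT' cs ch, hK, hid]
      simp [hin']

-- A's string-level fold = the char-level fold
lemma pvFold_toList : ∀ (l : List (String × String)) (s : String) (ch : Bool),
    l.foldl pvStepS (s, ch) =
      (String.ofList ((l.map (fun p => (p.1.toList, p.2.toList))).foldl pvStepC (s.toList, ch)).1,
       ((l.map (fun p => (p.1.toList, p.2.toList))).foldl pvStepC (s.toList, ch)).2) := by
  intro l
  induction l with
  | nil => intro s ch; simp
  | cons p l ih =>
    intro s ch
    simp only [List.foldl_cons, List.map_cons]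
    by_cases hin : PySem.Chars.isIn (pvPat p.1.toList) s.toList = true
    · have hinE : PySem.Chars.isIn
          ('\\' :: 't' :: 'e' :: 'x' :: 't' :: '{' :: (p.1.toList ++ ['}'])) s.toList = true := hin
      have hS : pvStepS (s, ch) p =
          (PySem.Str.replace s ("\\text{" ++ p.1 ++ "}") p.2, true) := by
        simp [pvStepS, hinE]
      have hC : pvStepC (s.toList, ch) (p.1.toList, p.2.toList) =
          (PySem.Chars.replace s.toList (pvPat p.1.toList) p.2.toList, true) := by
        simp [pvStepC, hin]
      rw [hS, hC, ih, PySem.Str.toList_replace, pvPat_toList]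
    · have hin' : PySem.Chars.isIn (pvPat p.1.toList) s.toList = false := by
        revert hin; cases PySem.Chars.isIn (pvPat p.1.toList) s.toList <;> simp
      have hinE : PySem.Chars.isIn
          ('\\' :: 't' :: 'e' :: 'x' :: 't' :: '{' :: (p.1.toList ++ ['}'])) s.toList = false := hin'
      have hS : pvStepS (s, ch) p = (s, ch) := by
        simp [pvStepS, hinE]
      have hC : pvStepC (s.toList, ch) (p.1.toList, p.2.toList) = (s.toList, ch) := by
        simp [pvStepC, hin']
      rw [hS, hC]
      exact ih s ch

lemma pvTable_good_bool :
    pvTable.all (fun p => p.1.all pvW && pvSafeRepl p.2) = true := by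
  rfl

lemma pvTable_good : ∀ p ∈ pvTable, (∀ c ∈ p.1, pvW c = true) ∧ pvSafeRepl p.2 = true := by
  have h := pvTable_good_bool
  rw [List.all_eq_true] at h
  intro p hp
  have := h p hp
  simp only [Bool.and_eq_true, List.all_eq_true] at this
  exact ⟨this.1, this.2⟩

-- ===== VERDICT (by name: the statement is the Claim_ definition above) =====
theorem fix_text_operators_spec : Claim_equal_fix_text_operators := by
  intro latex _
  unfold Spec_fix_text_operators fix_text_operators_alt
  rw [pvA_fold, ← pvCombined_eq, pvFold_toList]
  have hM := pvM pvTable pvTable_good latex.toList false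
  rw [show pvCombined.map (fun p => (p.1.toList, p.2.toList)) = pvTable from rfl, hM]
  simp
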